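-- pv_equiv track=rewrite | github.com/folenta/Diplomovka | principleLines.py | findFirstAndLastBlockCol
-- ===== SOURCE A (Python) =====
-- def findFirstAndLastBlockCol(blocks, rowCandidate):
--     firstFound = False
--     firstBlockCol = 0
--     lastBlockCol = 0
--
--     for col in range(len(blocks[rowCandidate])):
--         if blocks[rowCandidate][col]["background"] == 0:
--             if not firstFound:
--                 firstBlockCol = col
--                 firstFound = True
--             lastBlockCol = col
--
--     return firstBlockCol, lastBlockCol
-- ===== SOURCE B (Python) =====
-- def findFirstAndLastBlockCol(blocks, rowCandidate):
--     row = blocks[rowCandidate]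
--
--     firstBlockCol = 0
--     for col in range(len(row)):
--         if row[col]["background"] == 0:
--             firstBlockCol = col
--             break
--
--     lastBlockCol = 0
--     for col in range(len(row) - 1, -1, -1):
--         if row[col]["background"] == 0:
--             lastBlockCol = col
--             break
--
--     return firstBlockCol, lastBlockCol
-- ===== Notes on version B (the rewrite author's own statement) =====
-- stated objective: simpler
-- what changed: Replaces the single flag-tracking full pass with two independent short-circuiting scans: a forward scan that breaks at the first background==0 column and a backward scan that breaks at the last, removing the firstFound flag.
import Mathlib
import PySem

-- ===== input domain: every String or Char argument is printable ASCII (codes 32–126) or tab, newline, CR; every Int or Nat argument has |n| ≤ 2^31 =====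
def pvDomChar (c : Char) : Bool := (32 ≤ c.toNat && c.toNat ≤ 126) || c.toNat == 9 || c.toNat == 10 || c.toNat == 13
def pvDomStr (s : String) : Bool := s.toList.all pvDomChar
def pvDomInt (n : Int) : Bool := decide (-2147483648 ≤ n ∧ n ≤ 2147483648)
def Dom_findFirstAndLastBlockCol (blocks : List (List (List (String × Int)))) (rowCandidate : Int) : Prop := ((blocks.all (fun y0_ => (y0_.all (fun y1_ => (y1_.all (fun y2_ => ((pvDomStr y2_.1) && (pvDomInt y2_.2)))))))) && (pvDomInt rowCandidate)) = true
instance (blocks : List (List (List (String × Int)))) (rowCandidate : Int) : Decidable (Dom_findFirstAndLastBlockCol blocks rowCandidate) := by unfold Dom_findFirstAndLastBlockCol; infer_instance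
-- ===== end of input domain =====

-- B replaces A's single flag-tracking full pass by two independent short-circuiting
-- scans (forward for the first match, backward for the last); objective: simpler.

-- ===== PORT A =====
-- A: one pass over all columns with a firstFound flag, recording first and last
-- column whose dict has "background" == 0. Loop 'for col in range(len(row)): … row[col] …'
-- is ported as a fold over the enumerated row (same (col, cell) pairs, same state).
def findFirstAndLastBlockCol (blocks : List (List (List (String × Int)))) (rowCandidate : Int) : Int × Int :=
  let row := (PySem.List.pyGet? blocks rowCandidate).getD []
  let s := (PySem.List.enumerate row 0).foldl
    (fun (st : Bool × Int × Int) p =>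
      if List.lookup "background" p.2 = some (0 : Int) then
        (true, if st.1 then st.2.1 else p.1, p.1)
      else st) (false, 0, 0)
  (s.2.1, s.2.2)

-- ===== PORT B =====
-- forward scan: first index (from i) whose cell matches, default 0
def scanFirstCol (cells : List (List (String × Int))) (i : Int) : Int :=
  match cells with
  | [] => 0
  | c :: rest => if List.lookup "background" c = some (0 : Int) then i else scanFirstCol rest (i + 1)

-- backward scan: walks the REVERSED row with the index counting down from len-1, default 0
def scanLastCol (cells : List (List (String × Int))) (i : Int) : Int :=
  match cells with
  | [] => 0
  | c :: rest => if List.lookup "background" c = some (0 : Int) then i else scanLastCol rest (i - 1)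

def findFirstAndLastBlockCol_alt (blocks : List (List (List (String × Int)))) (rowCandidate : Int) : Int × Int :=
  let row := (PySem.List.pyGet? blocks rowCandidate).getD []
  (scanFirstCol row 0, scanLastCol row.reverse ((row.length : Int) - 1))

-- ===== PRECONDITION & SPEC =====
-- Pre_: rowCandidate is a valid (possibly negative) index into blocks — else Python raises
-- IndexError — and every cell of that row has a "background" key — else KeyError.
def Pre_findFirstAndLastBlockCol (blocks : List (List (List (String × Int)))) (rowCandidate : Int) : Prop :=
  (PySem.List.pyGet? blocks rowCandidate).isSome ∧
  ∀ row ∈ (PySem.List.pyGet? blocks rowCandidate).toList, ∀ c ∈ row,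
    (List.lookup "background" c).isSome
instance (blocks : List (List (List (String × Int)))) (rowCandidate : Int) : Decidable (Pre_findFirstAndLastBlockCol blocks rowCandidate) := by unfold Pre_findFirstAndLastBlockCol; infer_instance

def pvWitness_findFirstAndLastBlockCol : (List (List (List (String × Int)))) × Int :=
  ([[[("background", 0)], [("background", 1)]]], 0)

def Spec_findFirstAndLastBlockCol (blocks : List (List (List (String × Int)))) (rowCandidate : Int) (out : Int × Int) : Prop := out = findFirstAndLastBlockCol_alt blocks rowCandidate
instance (blocks : List (List (List (String × Int)))) (rowCandidate : Int) (out : Int × Int) : Decidable (Spec_findFirstAndLastBlockCol blocks rowCandidate out) := by unfold Spec_findFirstAndLastBlockCol; infer_instance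

-- ===== CLAIM (what is proved, stated in full; the proofs are below) =====
def Claim_equal_findFirstAndLastBlockCol : Prop := ∀ (blocks : List (List (List (String × Int)))) (rowCandidate : Int), Dom_findFirstAndLastBlockCol blocks rowCandidate → Pre_findFirstAndLastBlockCol blocks rowCandidate → Spec_findFirstAndLastBlockCol blocks rowCandidate (findFirstAndLastBlockCol blocks rowCandidate)

-- ===== LEMMAS AND PROOFS =====

-- the cell predicate and A's loop step
def pvZero (c : List (String × Int)) : Bool := List.lookup "background" c = some (0 : Int)

def pvStep (st : Bool × Int × Int) (p : Int × List (String × Int)) : Bool × Int × Int :=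
  if List.lookup "background" p.2 = some (0 : Int) then
    (true, if st.1 then st.2.1 else p.1, p.1)
  else st

lemma enumerate_append (xs ys : List (List (String × Int))) (s : Int) :
    PySem.List.enumerate (xs ++ ys) s
      = PySem.List.enumerate xs s ++ PySem.List.enumerate ys (s + xs.length) := by
  induction xs generalizing s with
  | nil => simp [PySem.List.enumerate_nil]
  | cons x xs ih =>
      simp [PySem.List.enumerate_cons, ih, add_comm]
      ring_nf

-- A's state once firstFound is set: first never changes again
lemma foldA_found (cells : List (List (String × Int))) (i f l : Int) :
    ((PySem.List.enumerate cells i).foldl pvStep (true, f, l)).1 = true ∧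
    ((PySem.List.enumerate cells i).foldl pvStep (true, f, l)).2.1 = f := by
  induction cells generalizing i l with
  | nil => simp [PySem.List.enumerate_nil]
  | cons c rest ih =>
      simp only [PySem.List.enumerate_cons, List.foldl_cons, pvStep]
      split_ifs <;> exact ih _ _

-- first two components of A's fold from the unfound state = (any match, forward scan)
lemma foldA_first (cells : List (List (String × Int))) (i : Int) :
    ((PySem.List.enumerate cells i).foldl pvStep (false, 0, 0)).2.1
      = scanFirstCol cells i ∧
    ((PySem.List.enumerate cells i).foldl pvStep (false, 0, 0)).1
      = cells.any pvZero := by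
  induction cells generalizing i with
  | nil => simp [PySem.List.enumerate_nil, scanFirstCol]
  | cons c rest ih =>
      simp only [PySem.List.enumerate_cons, List.foldl_cons, pvStep, scanFirstCol, List.any_cons, pvZero]
      by_cases h : List.lookup "background" c = some (0 : Int)
      · simp only [h, if_pos]
        have hf := foldA_found rest (i + 1) i i
        simp [hf.1, hf.2]
      · simp [h, ih (i + 1)]

-- third component is the "last match" fold, characterized by the backward scan of the reverse
lemma foldA_last (cells : List (List (String × Int))) (i : Int) (st : Bool × Int × Int) :
    ((PySem.List.enumerate cells i).foldl pvStep st).2.2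
      = if cells.any pvZero then scanLastCol cells.reverse (i + cells.length - 1) else st.2.2 := by
  induction cells using List.reverseRecOn generalizing i st with
  | nil => simp [PySem.List.enumerate_nil]
  | append_singleton rest c ih =>
      rw [enumerate_append]
      simp only [List.foldl_append, PySem.List.enumerate_cons, PySem.List.enumerate_nil,
        List.foldl_cons, List.foldl_nil, List.reverse_append, List.reverse_cons,
        List.reverse_nil, List.nil_append, List.cons_append, List.any_append, List.any_cons,
        List.any_nil, scanLastCol, List.length_append, List.length_cons, List.length_nil]
      by_cases h : List.lookup "background" c = some (0 : Int)
      · simp [pvStep, pvZero, h]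
        ring_nf
      · simp [pvStep, pvZero, h, ih i st]
        split_ifs with hz
        · congr 1
          ring
        · rfl

-- main equivalence on an arbitrary row
lemma row_eq (cells : List (List (String × Int))) :
    (((PySem.List.enumerate cells 0).foldl pvStep (false, 0, 0)).2.1,
     ((PySem.List.enumerate cells 0).foldl pvStep (false, 0, 0)).2.2)
      = (scanFirstCol cells 0, scanLastCol cells.reverse ((cells.length : Int) - 1)) := by
  have h1 := foldA_first cells 0
  have h2 := foldA_last cells 0 (false, 0, 0)
  by_cases ha : cells.any pvZero = true
  · simp [h1.1, h2, ha]
  · -- no match anywhere: everything is 0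
    have hf : scanFirstCol cells 0 = 0 := by
      have hgen : ∀ (l : List (List (String × Int))) (i : Int), l.any pvZero = false → scanFirstCol l i = 0 := by
        intro l
        induction l with
        | nil => intro i _; simp [scanFirstCol]
        | cons c rest ih =>
            intro i h
            simp only [List.any_cons, Bool.or_eq_false_iff, pvZero] at h
            simp [scanFirstCol, ih (i + 1) h.2]
            intro hc
            exact absurd (by simpa using hc) (by simpa using h.1)
      exact hgen cells 0 (by simpa using ha)
    have hl : scanLastCol cells.reverse ((cells.length : Int) - 1) = 0 := by
      have hrev : cells.reverse.any pvZero = false := by simpa using ha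
      have : ∀ (l : List (List (String × Int))) (i : Int), l.any pvZero = false → scanLastCol l i = 0 := by
        intro l
        induction l with
        | nil => intro i _; simp [scanLastCol]
        | cons c rest ih =>
            intro i h
            simp only [List.any_cons, Bool.or_eq_false_iff, pvZero] at h
            simp [scanLastCol, ih (i - 1) h.2]
            intro hc
            exact absurd (by simpa using hc) (by simpa using h.1)
      exact this _ _ hrev
    simp [h1.1, h2, ha, hf, hl]

-- ===== VERDICT (by name: the statement is the Claim_ definition above) =====
theorem findFirstAndLastBlockCol_spec : Claim_equal_findFirstAndLastBlockCol := by
  intro blocks rowCandidate _ _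
  unfold Spec_findFirstAndLastBlockCol findFirstAndLastBlockCol findFirstAndLastBlockCol_alt
  exact (row_eq ((PySem.List.pyGet? blocks rowCandidate).getD [])).symm ▸ rfl
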